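-- pv_equiv track=rewrite | github.com/sebvz777/Bachelorthesis | Web13_BCS09.py | inf_bessel
-- ===== SOURCE A (Python) =====
-- import math
--
-- def inf_bessel(i):
--
--     if i == 0:
--         return 1
--     else:
--         res = 0
--         for l in range(0, i):
--             res += math.comb(i, l) * math.comb(i-1, l) * inf_bessel(l)
--         return int(res)
-- ===== SOURCE B (Python) =====
-- import math
--
-- def inf_bessel(i):
--     if i < 0:
--         return 0
--     vals = [1]
--     for n in range(1, i + 1):
--         vals.append(sum(math.comb(n, l) * math.comb(n - 1, l) * vals[l]
--                         for l in range(n)))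
--     return vals[i]
-- ===== Notes on version B (the rewrite author's own statement) =====
-- stated objective: faster
-- what changed: Replaces A's exponential tree recursion by a bottom-up dynamic-programming table that stores each sequence value once and reuses it.
import Mathlib
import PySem

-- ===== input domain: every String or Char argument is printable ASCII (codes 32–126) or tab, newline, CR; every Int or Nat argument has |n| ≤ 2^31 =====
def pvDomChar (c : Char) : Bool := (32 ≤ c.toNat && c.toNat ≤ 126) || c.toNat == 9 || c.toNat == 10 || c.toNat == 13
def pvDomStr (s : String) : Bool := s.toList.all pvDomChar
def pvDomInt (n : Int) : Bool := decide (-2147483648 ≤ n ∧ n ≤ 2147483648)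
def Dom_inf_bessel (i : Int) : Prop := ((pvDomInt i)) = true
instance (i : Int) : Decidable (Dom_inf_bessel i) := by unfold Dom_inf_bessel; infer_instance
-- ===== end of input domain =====

-- B replaces A's exponential recursion by a bottom-up table of the sequence values (objective: faster, asymptotic).

-- ===== PORT A =====
-- math.comb(n, k); exact for the nonnegative arguments both programs pass it
def pyComb (n k : Int) : Int := (Nat.choose n.toNat k.toNat : Int)

def inf_bessel (i : Int) : Int :=
  if i = 0 then 1
  else
    (PySem.List.pyRange 0 i 1).attach.foldl
      (fun res l => res + pyComb i l.1 * pyComb (i - 1) l.1 * inf_bessel l.1) 0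
termination_by i.toNat
decreasing_by
  have := (PySem.List.mem_pyRange_one.mp l.2)
  omega

-- ===== PORT B =====
def inf_bessel_alt (i : Int) : Int :=
  if i < 0 then 0
  else
    let vals := (PySem.List.pyRange 1 (i + 1) 1).foldl
      (fun vals n =>
        vals ++ [((PySem.List.pyRange 0 n 1).map
          (fun l => pyComb n l * pyComb (n - 1) l * PySem.List.pyGetD vals l 0)).sum])
      [1]
    PySem.List.pyGetD vals i 0   -- vals[i] / vals[l]: the index is always in range here

-- ===== PRECONDITION & SPEC =====
def Spec_inf_bessel (i : Int) (out : Int) : Prop := out = inf_bessel_alt i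
instance (i : Int) (out : Int) : Decidable (Spec_inf_bessel i out) := by unfold Spec_inf_bessel; infer_instance

-- ===== CLAIM (what is proved, stated in full; the proofs are below) =====
def Claim_equal_inf_bessel : Prop := ∀ (i : Int), Dom_inf_bessel i → Spec_inf_bessel i (inf_bessel i)

-- ===== LEMMAS AND PROOFS =====

theorem inf_bessel_nonpos {i : Int} (h : i ≤ 0) (h0 : i ≠ 0) : inf_bessel i = 0 := by
  rw [inf_bessel, if_neg h0, PySem.List.pyRange_one_eq_nil h]
  rfl

theorem inf_bessel_sum {i : Int} (h0 : i ≠ 0) :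
    inf_bessel i =
      ((PySem.List.pyRange 0 i 1).map
        (fun l => pyComb i l * pyComb (i - 1) l * inf_bessel l)).sum := by
  rw [inf_bessel, if_neg h0]
  simp only [List.foldl_subtype, List.unattach_attach]
  rw [PySem.List.foldl_add]
  simp

theorem B_loop (m : Nat) :
    (PySem.List.pyRange 1 ((m : Int) + 1) 1).foldl
      (fun vals n =>
        vals ++ [((PySem.List.pyRange 0 n 1).map
          (fun l => pyComb n l * pyComb (n - 1) l * PySem.List.pyGetD vals l 0)).sum])
      [1]
    = (PySem.List.pyRange 0 ((m : Int) + 1) 1).map inf_bessel := by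
  induction m with
  | zero =>
    have h1 : ((0 : Nat) : Int) + 1 = 1 := by norm_num
    have h2 : PySem.List.pyRange 1 1 1 = [] := by decide
    have h3 : PySem.List.pyRange 0 1 1 = [0] := by decide
    rw [h1, h2, h3]
    simp only [List.foldl_nil, List.map_cons, List.map_nil]
    rw [inf_bessel]
    simp
  | succ m ih =>
    have hc : ((m + 1 : Nat) : Int) = (m : Int) + 1 := by push_cast; ring
    rw [hc,
        PySem.List.pyRange_one_succ_right (a := 1) (b := (m : Int) + 1) (by omega),
        PySem.List.pyRange_one_succ_right (a := 0) (b := (m : Int) + 1) (by omega),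
        List.foldl_append, ih, List.map_append, List.foldl_cons, List.foldl_nil,
        List.map_singleton]
    have hS : ((PySem.List.pyRange 0 ((m : Int) + 1) 1).map
        (fun l => pyComb ((m : Int) + 1) l * pyComb ((m : Int) + 1 - 1) l *
          PySem.List.pyGetD ((PySem.List.pyRange 0 ((m : Int) + 1) 1).map inf_bessel) l 0)).sum
        = inf_bessel ((m : Int) + 1) := by
      rw [inf_bessel_sum (i := (m : Int) + 1) (by omega)]
      refine congrArg List.sum (List.map_congr_left (fun l hl => ?_))
      have hb := PySem.List.mem_pyRange_one.mp hl
      rw [PySem.List.pyGetD_map_pyRange_of_nonneg inf_bessel ((m : Int) + 1) l 0 hb.1 hb.2]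
    rw [hS]

-- ===== VERDICT (by name: the statement is the Claim_ definition above) =====
theorem inf_bessel_spec : Claim_equal_inf_bessel := by
  intro i _
  unfold Spec_inf_bessel inf_bessel_alt
  by_cases hneg : i < 0
  · rw [if_pos hneg, inf_bessel_nonpos (le_of_lt hneg) (by omega)]
  · rw [if_neg hneg]
    obtain ⟨m, rfl⟩ : ∃ m : Nat, i = (m : Int) := ⟨i.toNat, by omega⟩
    rw [B_loop m,
        PySem.List.pyGetD_map_pyRange_of_nonneg inf_bessel ((m : Int) + 1) (m : Int) 0
          (by omega) (by omega)]
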